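-- pv_equiv track=rewrite | github.com/nguyentrongtai2k3/Pythonnn | main.py | vocabulary
-- ===== SOURCE A (Python) =====
-- def vocabulary(documents):
--     processed_docs = [doc.lower().replace(".","") for doc in documents]
--     vocab = {}
--     count = 0
--     for doc in processed_docs:
--         for word in doc.split() :
--             if word not in vocab :
--                 count = count+1
--                 vocab[word] = count
--     return vocab
-- ===== SOURCE B (Python) =====
-- def vocabulary(documents):
--     tokens = [w for doc in documents for w in doc.lower().replace(".", "").split()]
--     order = sorted(set(tokens), key=tokens.index)
--     return {w: r for r, w in enumerate(order, 1)}
-- ===== Notes on version B (the rewrite author's own statement) =====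
-- stated objective: alternative
-- what changed: Replaces the streaming membership-test-plus-counter dict construction by a sort-based ranking: flatten all documents into one token stream, take its set, sort the distinct words by their first position in the stream (tokens.index), and rank them 1..n with enumerate.
import Mathlib
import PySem

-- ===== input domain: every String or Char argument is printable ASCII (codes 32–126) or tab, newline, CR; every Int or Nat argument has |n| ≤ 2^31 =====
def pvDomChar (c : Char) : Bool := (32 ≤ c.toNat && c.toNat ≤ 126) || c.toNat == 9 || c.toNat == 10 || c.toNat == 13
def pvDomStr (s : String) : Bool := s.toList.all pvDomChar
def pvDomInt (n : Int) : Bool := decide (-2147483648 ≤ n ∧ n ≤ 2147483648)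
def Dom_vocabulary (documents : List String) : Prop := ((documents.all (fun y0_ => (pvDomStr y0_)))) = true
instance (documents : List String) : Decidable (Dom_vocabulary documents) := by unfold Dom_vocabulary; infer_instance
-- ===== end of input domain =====

-- B replaces A's streaming membership-test-plus-counter by a sort-based ranking
-- (set of the flattened token stream, sorted by first position, then ranked); alternative, same result.

-- ===== PORT A =====
def vocabulary (documents : List String) : List (String × Int) :=
  let processed := documents.map (fun doc => PySem.Str.replace (PySem.Str.lower doc) "." "")
  let st := processed.foldl
    (fun (st : PySem.Dict String Int × Int) doc =>
      (PySem.Str.split₀ doc).foldl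
        (fun st word =>
          if ¬ st.1.contains word then (st.1.insert word (st.2 + 1), st.2 + 1) else st)
        st)
    (PySem.Dict.empty, 0)
  st.1.items

-- ===== PORT B =====
-- key=tokens.index: for every element of set(tokens) Python's .index succeeds, so getD 0 is exact here
def vocabulary_alt (documents : List String) : List (String × Int) :=
  let tokens := documents.flatMap (fun doc => PySem.Str.split₀ (PySem.Str.replace (PySem.Str.lower doc) "." ""))
  let order := PySem.List.sorted (PySem.Set.ofList tokens) (fun w => (PySem.List.index? tokens w).getD 0) false
  (PySem.Dict.ofList ((PySem.List.enumerate order 0).map (fun p => (p.2, p.1 + 1)))).items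

-- ===== PRECONDITION & SPEC =====
def Spec_vocabulary (documents : List String) (out : List (String × Int)) : Prop := out = vocabulary_alt documents
instance (documents : List String) (out : List (String × Int)) : Decidable (Spec_vocabulary documents out) := by unfold Spec_vocabulary; infer_instance

-- ===== CLAIM (what is proved, stated in full; the proofs are below) =====
def Claim_equal_vocabulary : Prop := ∀ (documents : List String), Dom_vocabulary documents → Spec_vocabulary documents (vocabulary documents)

-- ===== LEMMAS AND PROOFS =====

-- the step of A's inner loop
def pvStep (st : PySem.Dict String Int × Int) (word : String) : PySem.Dict String Int × Int :=
  if ¬ st.1.contains word then (st.1.insert word (st.2 + 1), st.2 + 1) else st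

-- 1-based numbering of an already-deduplicated word list
def pvNum (s : List String) : List (String × Int) :=
  (PySem.List.enumerate s 0).map (fun p => (p.2, p.1 + 1))

theorem pvNum_map_fst (s : List String) : (pvNum s).map (·.1) = s := by
  simp [pvNum, List.map_map]
  exact PySem.List.map_snd_enumerate s 0

theorem pvNum_append (s : List String) (w : String) :
    pvNum (s ++ [w]) = pvNum s ++ [(w, (s.length : Int) + 1)] := by
  simp [pvNum, PySem.List.enumerate_append, PySem.List.enumerate_cons, PySem.List.enumerate_nil]

theorem foldl_inner {σ : Type} (docs : List String) (f : String → List String)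
    (g : σ → String → σ) (st : σ) :
    docs.foldl (fun st doc => (f doc).foldl g st) st = (docs.flatMap f).foldl g st := by
  induction docs generalizing st with
  | nil => rfl
  | cons d ds ih => simp [List.flatMap_cons, List.foldl_append, ih]

theorem contains_mk_pvNum (s : List String) (w : String) :
    (PySem.Dict.mk (pvNum s)).contains w = decide (w ∈ s) := by
  rw [PySem.Dict.contains_eq_decide_mem_keys]
  have : (PySem.Dict.mk (pvNum s)).keys = s := by
    rw [PySem.Dict.keys_mk]; exact pvNum_map_fst s
  rw [this]

theorem pvStep_invariant (ws : List String) (s : List String) (hs : s.Nodup) :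
    ws.foldl pvStep (PySem.Dict.mk (pvNum s), (s.length : Int))
      = (PySem.Dict.mk (pvNum (PySem.Set.update s ws)), ((PySem.Set.update s ws).length : Int)) := by
  induction ws generalizing s with
  | nil => rw [PySem.Set.update_nil]; rfl
  | cons w ws ih =>
    rw [List.foldl_cons, PySem.Set.update_cons]
    by_cases hw : w ∈ s
    · have hc : (PySem.Dict.mk (pvNum s)).contains w = true := by
        rw [contains_mk_pvNum]; simp [hw]
      have hst : pvStep (PySem.Dict.mk (pvNum s), (s.length : Int)) w
          = (PySem.Dict.mk (pvNum s), (s.length : Int)) := by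
        simp [pvStep, hc]
      rw [hst, PySem.Set.add_of_mem hw]
      exact ih s hs
    · have hc : (PySem.Dict.mk (pvNum s)).contains w = false := by
        rw [contains_mk_pvNum]; simp [hw]
      have hd : (PySem.Dict.mk (pvNum s)).insert w ((s.length : Int) + 1)
          = PySem.Dict.mk (pvNum (s ++ [w])) := by
        apply PySem.Dict.ext
        rw [PySem.Dict.items_insert_of_not_contains _ _ hc, pvNum_append]
      have hst : pvStep (PySem.Dict.mk (pvNum s), (s.length : Int)) w
          = (PySem.Dict.mk (pvNum (s ++ [w])), (((s ++ [w]).length : Nat) : Int)) := by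
        simp only [pvStep, hc]
        rw [if_pos (by simp)]
        rw [hd]
        simp
      rw [hst, PySem.Set.add_of_not_mem hw]
      refine ih (s ++ [w]) ?_
      rw [List.nodup_append]
      refine ⟨hs, List.nodup_singleton w, ?_⟩
      intro a ha b hb
      simp only [List.mem_singleton] at hb
      subst hb
      exact fun he => hw (he ▸ ha)

theorem foldl_insert_items (pairs : List (String × Int)) (d : PySem.Dict String Int)
    (h : ∀ p ∈ pairs, d.contains p.1 = false) (hn : (pairs.map (·.1)).Nodup) :
    (pairs.foldl (fun d p => d.insert p.1 p.2) d).items = d.items ++ pairs := by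
  induction pairs generalizing d with
  | nil => simp
  | cons p ps ih =>
    rw [List.foldl_cons]
    have hc := h p (List.mem_cons_self)
    rw [ih (d.insert p.1 p.2) ?_ (by simpa using hn.of_cons),
        PySem.Dict.items_insert_of_not_contains _ _ hc]
    · simp
    · intro q hq
      rw [PySem.Dict.contains_insert]
      have hne : q.1 ≠ p.1 := by
        simp only [List.map_cons, List.nodup_cons, List.mem_map] at hn
        exact fun he => hn.1 ⟨q, hq, he⟩
      simp [hne, h q (List.mem_cons_of_mem _ hq)]

theorem ofList_items_of_nodup (pairs : List (String × Int)) (h : (pairs.map (·.1)).Nodup) :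
    (PySem.Dict.ofList pairs).items = pairs := by
  have := foldl_insert_items pairs PySem.Dict.empty (by intro p _; rfl) h
  simpa [PySem.Dict.ofList] using this

-- first index of a member of the prefix is below the prefix length
theorem idx_of_mem_prefix (pre rest : List String) (a : String) (ha : a ∈ pre) :
    (PySem.List.index? (pre ++ rest) a).getD 0 < pre.length := by
  rw [PySem.List.index?_append_of_mem rest ha]
  obtain ⟨k, hk⟩ := Option.isSome_iff_exists.mp ((PySem.List.index?_isSome_iff pre a).mpr ha)
  obtain ⟨hlt, _, _⟩ := PySem.List.getElem_of_index?_eq_some hk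
  rw [hk]
  simpa using hlt

-- first index of a fresh word at the junction is exactly the prefix length
theorem idx_fresh (pre rest : List String) (a : String) (ha : a ∉ pre) :
    PySem.List.index? (pre ++ a :: rest) a = some pre.length := by
  induction pre with
  | nil => exact PySem.List.index?_cons_self a rest
  | cons x l ih =>
    have hx : x ≠ a := fun he => ha (he ▸ List.mem_cons_self)
    rw [List.cons_append, PySem.List.index?_cons_of_ne _ hx,
        ih (fun h => ha (List.mem_cons_of_mem _ h))]
    rfl

-- the first-occurrence dedup order is strictly increasing in first index
theorem pairwise_aux (xs : List String) :
    ∀ (rest pre : List String), pre ++ rest = xs →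
    (PySem.Set.ofList pre).Pairwise
      (fun a b => (PySem.List.index? xs a).getD 0 < (PySem.List.index? xs b).getD 0) →
    (PySem.Set.update (PySem.Set.ofList pre) rest).Pairwise
      (fun a b => (PySem.List.index? xs a).getD 0 < (PySem.List.index? xs b).getD 0) := by
  intro rest
  induction rest with
  | nil => intro pre _ hp; rw [PySem.Set.update_nil]; exact hp
  | cons r rest' ih =>
    intro pre hx hp
    rw [PySem.Set.update_cons, ← PySem.Set.ofList_append_singleton]
    refine ih (pre ++ [r]) (by simpa using hx) ?_
    rw [PySem.Set.ofList_append_singleton]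
    by_cases hr : r ∈ pre
    · rw [PySem.Set.add_of_mem (by simpa [PySem.Set.mem_ofList] using hr)]
      exact hp
    · rw [PySem.Set.add_of_not_mem (by simpa [PySem.Set.mem_ofList] using hr)]
      rw [List.pairwise_append]
      refine ⟨hp, List.pairwise_singleton _ _, ?_⟩
      intro a ha b hb
      simp only [List.mem_singleton] at hb
      show (PySem.List.index? xs a).getD 0 < (PySem.List.index? xs b).getD 0
      rw [hb]
      have ha' : a ∈ pre := (PySem.Set.mem_ofList pre a).mp ha
      have h1 : (PySem.List.index? xs a).getD 0 < pre.length := by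
        rw [← hx]; exact idx_of_mem_prefix pre (r :: rest') a ha'
      have h2 : (PySem.List.index? xs r).getD 0 = pre.length := by
        rw [← hx, idx_fresh pre rest' r hr]; rfl
      omega

theorem sorted_ofList_by_index (xs : List String) :
    PySem.List.sorted (PySem.Set.ofList xs)
      (fun w => (PySem.List.index? xs w).getD 0) false = PySem.Set.ofList xs := by
  refine PySem.List.sorted_eq_of_perm_of_pairwise_lt _ _ _ (List.Perm.refl _) ?_
  exact pairwise_aux xs xs [] rfl (by simp [PySem.Set.ofList])

-- ===== VERDICT (by name: the statement is the Claim_ definition above) =====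
theorem vocabulary_spec : Claim_equal_vocabulary := by
  intro documents _
  unfold Spec_vocabulary vocabulary vocabulary_alt
  simp only []
  rw [show (fun (st : PySem.Dict String Int × Int) (word : String) =>
        if ¬ st.1.contains word then (st.1.insert word (st.2 + 1), st.2 + 1) else st) = pvStep from rfl]
  rw [foldl_inner, List.flatMap_map]
  have h0 := pvStep_invariant
    (documents.flatMap fun doc => PySem.Str.split₀ (PySem.Str.replace (PySem.Str.lower doc) "." ""))
    [] List.nodup_nil
  rw [PySem.Set.update_nil_left] at h0
  rw [show ((PySem.Dict.empty : PySem.Dict String Int), (0 : Int))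
        = (PySem.Dict.mk (pvNum []), ((List.length ([] : List String) : Nat) : Int)) from rfl]
  rw [h0, sorted_ofList_by_index]
  show pvNum (PySem.Set.ofList (documents.flatMap fun doc =>
      PySem.Str.split₀ (PySem.Str.replace (PySem.Str.lower doc) "." "")))
    = (PySem.Dict.ofList (pvNum (PySem.Set.ofList (documents.flatMap fun doc =>
      PySem.Str.split₀ (PySem.Str.replace (PySem.Str.lower doc) "." ""))))).items
  exact (ofList_items_of_nodup _ (by
    rw [pvNum_map_fst]
    exact PySem.Set.nodup_ofList _)).symm
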